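-- pv_equiv track=rewrite | github.com/callmewenhao/leetcode | dailys/dieSimulator.py | dieSimulator2
-- ===== SOURCE A (Python) =====
-- from typing import List
-- from functools import cache
--
-- def dieSimulator2(n: int, rollMax: List[int]) -> int:
--     MOD = 10 ** 9 + 7
--
--     @cache
--     def dfs(i: int, last: int, left: int) -> int:
--         if i == 0:
--             return 1
--         res = 0
--         for j, mx in enumerate(rollMax):
--             if j != last:
--                 res += dfs(i - 1, j, mx - 1)
--             elif left:
--                 res += dfs(i - 1, j, left - 1)
--         return res % MOD
--
--     return sum(dfs(n - 1, j, mx - 1) for j, mx in enumerate(rollMax)) % MOD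
-- ===== SOURCE B (Python) =====
-- def dieSimulator2(n, rollMax):
--     # Bottom-up layered DP instead of top-down recursion: cur[j][t] = number of ways to
--     # finish the sequence when t extra consecutive repeats of face j are already used
--     # (remaining budget rollMax[j]-1-t); each pass consumes one roll and uses a
--     # total-minus-self sum instead of an inner loop over the other faces.
--     MOD = 10 ** 9 + 7
--     cur = [[1] * n for _ in rollMax]
--     for _ in range(1, n):
--         total = sum(row[0] for row in cur)
--         cur = [[(total - row[0] + (v if mx - 1 - t != 0 else 0)) % MOD
--                 for t, v in enumerate(row[1:])]
--                for mx, row in zip(rollMax, cur)]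
--     return sum(row[0] for row in cur) % MOD
-- ===== Notes on version B (the rewrite author's own statement) =====
-- stated objective: faster
-- what changed: Replaces A's top-down memoized recursion dfs(i,last,left) by a bottom-up layered table cur[face][repeats-used], using a total-minus-self sum instead of the inner loop over all faces.
-- outside the precondition, e.g. on dieSimulator2(495, [2, 3]): A returns 952781698, B returns 952781698; on dieSimulator2(-1, [8]): A returns 0, B raises IndexError
import Mathlib
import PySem

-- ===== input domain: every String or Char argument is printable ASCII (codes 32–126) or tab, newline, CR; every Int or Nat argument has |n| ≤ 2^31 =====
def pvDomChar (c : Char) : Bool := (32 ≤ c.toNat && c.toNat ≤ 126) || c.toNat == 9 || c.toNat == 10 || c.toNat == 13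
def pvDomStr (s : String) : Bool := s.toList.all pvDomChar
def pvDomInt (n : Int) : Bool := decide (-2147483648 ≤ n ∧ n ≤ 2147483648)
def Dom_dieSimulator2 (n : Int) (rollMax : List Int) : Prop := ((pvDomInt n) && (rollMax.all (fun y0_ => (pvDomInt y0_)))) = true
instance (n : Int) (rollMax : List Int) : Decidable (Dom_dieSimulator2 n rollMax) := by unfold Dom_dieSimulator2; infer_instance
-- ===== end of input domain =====

-- B replaces A's top-down memoized recursion over (rolls left, last face, remaining budget) by a
-- bottom-up layered table indexed by (face, repeats already used), with a total-minus-self sum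
-- instead of the inner loop over the other faces; objective: faster (constant factor).

def pvMOD : Int := 1000000007

-- ===== PORT A =====
-- Python's @cache is ported as an explicit memo table (keyed by dfs's arguments (i, last, left))
-- threaded through the recursion; each dfs call returns (value, updated table).
abbrev MemoA := Std.HashMap (Nat × Int × Int) Int

-- one level of dfs: the 'for j, mx in enumerate(rollMax)' loop followed by '% MOD'
def dfsAMstep (prev : Int → Int → MemoA → Int × MemoA) (rollMax : List Int)
    (last left : Int) (memo : MemoA) : Int × MemoA :=
  let r := (PySem.List.enumerate rollMax).foldl
    (fun acc jm =>
      if jm.1 ≠ last then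
        let v := prev jm.1 (jm.2 - 1) acc.2
        (acc.1 + v.1, v.2)
      else if left ≠ 0 then
        let v := prev jm.1 (left - 1) acc.2
        (acc.1 + v.1, v.2)
      else acc)
    ((0 : Int), memo)
  (PySem.Int.mod r.1 pvMOD, r.2)

-- dfs(i, last, left); Python recurses on i down to its base case i == 0, so i is a Nat here
def dfsAM (rollMax : List Int) : Nat → Int → Int → MemoA → Int × MemoA
  | 0, _, _, memo => (1, memo)
  | i + 1, last, left, memo =>
    match memo[((i + 1, last, left) : Nat × Int × Int)]? with
    | some v => (v, memo)
    | none =>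
      let r := dfsAMstep (dfsAM rollMax i) rollMax last left memo
      (r.1, r.2.insert (i + 1, last, left) r.1)

-- under Pre_ (1 ≤ n), (n-1).toNat = n-1; for n ≤ 0 Python's recursion never reaches its base case
def dieSimulator2 (n : Int) (rollMax : List Int) : Int :=
  let r := (PySem.List.enumerate rollMax).foldl
    (fun acc jm =>
      let v := dfsAM rollMax (n - 1).toNat jm.1 (jm.2 - 1) acc.2
      (acc.1 + v.1, v.2))
    ((0 : Int), (∅ : MemoA))
  PySem.Int.mod r.1 pvMOD

-- ===== PORT B =====
-- one new row: '[(total - row[0] + (v if mx-1-t != 0 else 0)) % MOD for t, v in enumerate(row[1:])]'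
-- row[0] is always in range here (rows inside the loop are nonempty), so headD is exact
def stepRowB (total mx : Int) (row : List Int) : List Int :=
  (PySem.List.enumerate (PySem.List.slice row (some 1) none)).map
    (fun tv => PySem.Int.mod (total - row.headD 0 + (if mx - 1 - tv.1 ≠ 0 then tv.2 else 0)) pvMOD)

def dieSimulator2_alt (n : Int) (rollMax : List Int) : Int :=
  let cur :=
    (PySem.List.pyRange 1 n 1).foldl
      (fun cur _ =>
        let total := cur.foldl (fun s row => s + row.headD 0) 0
        (rollMax.zip cur).map (fun p => stepRowB total p.1 p.2))
      (rollMax.map fun _ => List.replicate n.toNat 1)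
  PySem.Int.mod (cur.foldl (fun s row => s + row.headD 0) 0) pvMOD

-- ===== PRECONDITION & SPEC =====
-- Pre_ excludes, for nonempty rollMax: (a) n ≤ 0, where Python A's dfs recurses past its base case —
-- it usually raises RecursionError, and in the degenerate single-positive-cap case returns an
-- accidental 0 from the dying repeat chain, while B raises IndexError on row[0] there; and
-- (b) n > 490, where A's recursion — two CPython stack frames per roll (dfs plus its @cache
-- wrapper) on top of the caller's stack — exceeds the default recursion limit of 1000 and raises
-- RecursionError (the exact cut-off shifts with the caller's stack depth: from n = 499 A raises
-- even when called at top level, and with just 10 extra caller frames already from n = 493).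
def Pre_dieSimulator2 (n : Int) (rollMax : List Int) : Prop := (1 ≤ n ∧ n ≤ 490) ∨ rollMax = []
instance (n : Int) (rollMax : List Int) : Decidable (Pre_dieSimulator2 n rollMax) := by
  unfold Pre_dieSimulator2; infer_instance

def pvWitness_dieSimulator2 : Int × List Int := (3, [2, 2, 1])

def Spec_dieSimulator2 (n : Int) (rollMax : List Int) (out : Int) : Prop := out = dieSimulator2_alt n rollMax
instance (n : Int) (rollMax : List Int) (out : Int) : Decidable (Spec_dieSimulator2 n rollMax out) := by unfold Spec_dieSimulator2; infer_instance

-- ===== CLAIM (what is proved, stated in full; the proofs are below) =====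
def Claim_equal_dieSimulator2 : Prop := ∀ (n : Int) (rollMax : List Int), Dom_dieSimulator2 n rollMax → Pre_dieSimulator2 n rollMax → Spec_dieSimulator2 n rollMax (dieSimulator2 n rollMax)

-- ===== LEMMAS AND PROOFS =====

-- the value of Python's dfs as a pure function (the memo table only caches these values)
def dfsAstep (prev : Int → Int → Int) (rollMax : List Int) (last left : Int) : Int :=
  PySem.Int.mod
    ((PySem.List.enumerate rollMax).foldl
      (fun res jm =>
        if jm.1 ≠ last then res + prev jm.1 (jm.2 - 1)
        else if left ≠ 0 then res + prev jm.1 (left - 1)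
        else res) 0)
    pvMOD

def dfsAref (rollMax : List Int) : Nat → Int → Int → Int
  | 0, _, _ => 1
  | i + 1, last, left => dfsAstep (dfsAref rollMax i) rollMax last left

-- the common value both ports compute: phi i mx left = dfs(i, j, left) for any index j with rollMax[j] = mx
def phi (rollMax : List Int) : Nat → Int → Int → Int
  | 0, _, _ => 1
  | i + 1, mx, left =>
    PySem.Int.mod
      ((rollMax.map (fun m => phi rollMax i m (m - 1))).sum - phi rollMax i mx (mx - 1)
        + (if left ≠ 0 then phi rollMax i mx (left - 1) else 0))
      pvMOD

-- a memo table is OK when every entry holds the pure dfs value for its key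
def MemoOK (rollMax : List Int) (m : MemoA) : Prop :=
  ∀ (i : Nat) (last left v : Int),
    m[((i, last, left) : Nat × Int × Int)]? = some v → v = dfsAref rollMax i last left

theorem foldl_memo (rollMax : List Int) (prev : Int → Int → MemoA → Int × MemoA)
    (pref : Int → Int → Int) (last left : Int)
    (hprev : ∀ l lf m, MemoOK rollMax m →
      (prev l lf m).1 = pref l lf ∧ MemoOK rollMax (prev l lf m).2) :
    ∀ (l : List (Int × Int)) (acc : Int) (m : MemoA), MemoOK rollMax m →
      (l.foldl
          (fun acc jm =>
            if jm.1 ≠ last then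
              let v := prev jm.1 (jm.2 - 1) acc.2
              (acc.1 + v.1, v.2)
            else if left ≠ 0 then
              let v := prev jm.1 (left - 1) acc.2
              (acc.1 + v.1, v.2)
            else acc)
          (acc, m)).1
        = l.foldl
            (fun res jm =>
              if jm.1 ≠ last then res + pref jm.1 (jm.2 - 1)
              else if left ≠ 0 then res + pref jm.1 (left - 1)
              else res) acc
      ∧ MemoOK rollMax
          (l.foldl
            (fun acc jm =>
              if jm.1 ≠ last then
                let v := prev jm.1 (jm.2 - 1) acc.2
                (acc.1 + v.1, v.2)
              else if left ≠ 0 then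
                let v := prev jm.1 (left - 1) acc.2
                (acc.1 + v.1, v.2)
              else acc)
            (acc, m)).2 := by
  intro l
  induction l with
  | nil => intro acc m hm; exact ⟨rfl, hm⟩
  | cons x xs ih =>
    intro acc m hm
    simp only [List.foldl_cons]
    by_cases h1 : x.1 ≠ last
    · rw [if_pos h1, if_pos h1]
      obtain ⟨he, hok⟩ := hprev x.1 (x.2 - 1) m hm
      rw [he]
      exact ih (acc + pref x.1 (x.2 - 1)) (prev x.1 (x.2 - 1) m).2 hok
    · rw [if_neg h1, if_neg h1]
      by_cases h2 : left ≠ 0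
      · rw [if_pos h2, if_pos h2]
        obtain ⟨he, hok⟩ := hprev x.1 (left - 1) m hm
        rw [he]
        exact ih (acc + pref x.1 (left - 1)) (prev x.1 (left - 1) m).2 hok
      · rw [if_neg h2, if_neg h2]
        exact ih acc m hm

theorem dfsAM_ok (rollMax : List Int) :
    ∀ (i : Nat) (last left : Int) (m : MemoA), MemoOK rollMax m →
      (dfsAM rollMax i last left m).1 = dfsAref rollMax i last left
        ∧ MemoOK rollMax (dfsAM rollMax i last left m).2 := by
  intro i
  induction i with
  | zero => intro last left m hm; exact ⟨rfl, hm⟩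
  | succ i ih =>
    intro last left m hm
    have e : dfsAM rollMax (i + 1) last left m =
        match m[((i + 1, last, left) : Nat × Int × Int)]? with
        | some v => (v, m)
        | none =>
          let r := dfsAMstep (dfsAM rollMax i) rollMax last left m
          (r.1, r.2.insert (i + 1, last, left) r.1) := rfl
    cases hl : m[((i + 1, last, left) : Nat × Int × Int)]? with
    | some v =>
      rw [e, hl]
      exact ⟨hm (i + 1) last left v hl, hm⟩
    | none =>
      rw [e, hl]
      dsimp only
      have hstep := foldl_memo rollMax (dfsAM rollMax i) (dfsAref rollMax i) last left ih
        (PySem.List.enumerate rollMax) 0 m hm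
      have hval : (dfsAMstep (dfsAM rollMax i) rollMax last left m).1
          = dfsAref rollMax (i + 1) last left := by
        show PySem.Int.mod _ pvMOD = dfsAref rollMax (i + 1) last left
        rw [hstep.1]
        rfl
      have hok : MemoOK rollMax (dfsAMstep (dfsAM rollMax i) rollMax last left m).2 := hstep.2
      refine ⟨hval, ?_⟩
      intro i' l' f' v hv
      rw [Std.HashMap.getElem?_insert] at hv
      by_cases hk : ((i + 1, last, left) : Nat × Int × Int) = (i', l', f')
      · rw [if_pos (by exact beq_iff_eq.mpr hk)] at hv
        obtain ⟨h1, h2, h3⟩ : i + 1 = i' ∧ last = l' ∧ left = f' := by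
          injection hk with ha hb
          injection hb with hb hc
          exact ⟨ha, hb, hc⟩
        subst h1; subst h2; subst h3
        have := Option.some.inj hv
        rw [← this, hval]
      · rw [if_neg (by simp [hk])] at hv
        exact hok i' l' f' v hv

theorem foldl_top (rollMax : List Int) (N : Nat) :
    ∀ (l : List (Int × Int)) (acc : Int) (m : MemoA), MemoOK rollMax m →
      (l.foldl
          (fun acc jm =>
            let v := dfsAM rollMax N jm.1 (jm.2 - 1) acc.2
            (acc.1 + v.1, v.2))
          (acc, m)).1
        = l.foldl (fun a jm => a + dfsAref rollMax N jm.1 (jm.2 - 1)) acc := by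
  intro l
  induction l with
  | nil => intro acc m _; rfl
  | cons x xs ih =>
    intro acc m hm
    simp only [List.foldl_cons]
    obtain ⟨he, hok⟩ := dfsAM_ok rollMax N x.1 (x.2 - 1) m hm
    rw [he]
    exact ih (acc + dfsAref rollMax N x.1 (x.2 - 1)) (dfsAM rollMax N x.1 (x.2 - 1) m).2 hok

theorem memoOK_empty (rollMax : List Int) : MemoOK rollMax (∅ : MemoA) := by
  intro i last left v hv
  simp at hv

-- enumerate-sum with an if on an index never hit (all indices ≥ s > m)
theorem sum_enum_noix (f : Int → Int) (c : Int) :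
    ∀ (l : List Int) (s m : Int), m < s →
      ((PySem.List.enumerate l s).map (fun jm => if jm.1 ≠ m then f jm.2 else c)).sum
        = (l.map f).sum := by
  intro l
  induction l with
  | nil => intro s m _; simp [PySem.List.enumerate_nil]
  | cons x xs ih =>
    intro s m hm
    rw [PySem.List.enumerate_cons]
    simp only [List.map_cons, List.sum_cons]
    rw [if_pos (by omega), ih (s + 1) m (by omega)]

-- enumerate-sum with an if hitting exactly index j
theorem sum_enum_ite (f : Int → Int) (c : Int) :
    ∀ (l : List Int) (s : Int) (j : Nat), j < l.length →
      ((PySem.List.enumerate l s).map (fun jm => if jm.1 ≠ s + (j : Int) then f jm.2 else c)).sum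
        = (l.map f).sum - f (l.getD j 0) + c := by
  intro l
  induction l with
  | nil => intro s j hj; simp at hj
  | cons x xs ih =>
    intro s j hj
    rw [PySem.List.enumerate_cons]
    simp only [List.map_cons, List.sum_cons]
    cases j with
    | zero =>
      rw [if_neg (by omega), sum_enum_noix f c xs (s + 1) (s + (0 : Nat)) (by omega)]
      simp; ring
    | succ j =>
      have hx : s + ((j : Int) + 1) = (s + 1) + (j : Int) := by ring
      rw [if_pos (by omega)]
      have := ih (s + 1) j (by simpa using hj)
      push_cast
      rw [hx, this]
      simp; ring

theorem dfsA_eq_phi (rollMax : List Int) (i : Nat) :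
    ∀ (j : Nat), j < rollMax.length → ∀ (left : Int),
      dfsAref rollMax i (j : Int) left = phi rollMax i (rollMax.getD j 0) left := by
  induction i with
  | zero => intro j hj left; simp [dfsAref, phi]
  | succ i ih =>
    intro j hj left
    show dfsAstep (dfsAref rollMax i) rollMax (j : Int) left = _
    unfold dfsAstep
    rw [PySem.List.foldl_congr_mem (PySem.List.enumerate rollMax)
      (fun res jm =>
        if jm.1 ≠ (j : Int) then res + dfsAref rollMax i jm.1 (jm.2 - 1)
        else if left ≠ 0 then res + dfsAref rollMax i jm.1 (left - 1) else res)
      (fun res jm => res +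
        (if jm.1 ≠ (j : Int) then phi rollMax i jm.2 (jm.2 - 1)
         else if left ≠ 0 then phi rollMax i (rollMax.getD j 0) (left - 1) else 0))
      0
      (by
        intro acc jm hmem
        obtain ⟨k, hk, rfl⟩ := (PySem.List.mem_enumerate_iff rollMax 0 jm).1 hmem
        dsimp only
        by_cases hkj : ((0 : Int) + (k : Nat)) ≠ (j : Int)
        · rw [if_pos hkj, if_pos hkj]
          have : ((0 : Int) + (k : Nat)) = ((k : Nat) : Int) := by omega
          rw [this, ih k hk]
          rw [List.getD_eq_getElem rollMax 0 hk]
        · rw [if_neg hkj, if_neg hkj]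
          have hkj' : k = j := by omega
          by_cases hl : left ≠ 0
          · rw [if_pos hl, if_pos hl]
            have : ((0 : Int) + (k : Nat)) = ((j : Nat) : Int) := by omega
            rw [this, ih j hj]
          · rw [if_neg hl, if_neg hl]; ring)]
    rw [PySem.List.foldl_add]
    have hsum := sum_enum_ite (fun m => phi rollMax i m (m - 1))
      (if left ≠ 0 then phi rollMax i (rollMax.getD j 0) (left - 1) else 0) rollMax 0 j hj
    simp only [zero_add] at hsum ⊢
    rw [hsum]
    rfl

-- B's layer table after k loop iterations, when n ≥ 1 and N = n.toNat
def TB (rollMax : List Int) (N k : Nat) : List (List Int) :=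
  rollMax.map (fun m => (List.range (N - k)).map (fun (t : Nat) => phi rollMax k m (m - 1 - (t : Int))))

-- B's loop body as a named function (definitionally the lambda in dieSimulator2_alt)
def stepFoldB (rollMax : List Int) : List (List Int) → Int → List (List Int) :=
  fun cur _ =>
    let total := cur.foldl (fun s row => s + row.headD 0) 0
    (rollMax.zip cur).map (fun p => stepRowB total p.1 p.2)

theorem alt_eq_fold (n : Int) (rollMax : List Int) :
    dieSimulator2_alt n rollMax =
      PySem.Int.mod
        (((PySem.List.pyRange 1 n 1).foldl (stepFoldB rollMax)
            (rollMax.map fun _ => List.replicate n.toNat 1)).foldl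
          (fun s row => s + row.headD 0) 0) pvMOD := rfl

theorem headD_map_range {f : Nat → Int} {w : Nat} (hw : 0 < w) :
    ((List.range w).map f).headD 0 = f 0 := by
  cases w with
  | zero => omega
  | succ v => rw [List.range_succ_eq_map]; simp

theorem zip_self_map {α β : Type} (l : List α) (h : α → β) :
    l.zip (l.map h) = l.map (fun a => (a, h a)) := by
  induction l with
  | nil => rfl
  | cons x xs ih => simpa [List.zip] using ih

theorem total_eq (rollMax : List Int) (N k : Nat) (hk : k < N) :
    (TB rollMax N k).foldl (fun s row => s + row.headD 0) 0
      = (rollMax.map (fun m => phi rollMax k m (m - 1))).sum := by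
  rw [PySem.List.foldl_add, TB, List.map_map]
  rw [zero_add]
  congr 1
  apply List.map_congr_left
  intro m _
  simp only [Function.comp_apply]
  rw [headD_map_range (by omega)]
  norm_num

theorem init_eq_TB (n : Int) (rollMax : List Int) :
    (rollMax.map fun _ => List.replicate n.toNat 1) = TB rollMax n.toNat 0 := by
  unfold TB
  apply List.map_congr_left
  intro m _
  rw [Nat.sub_zero]
  apply Eq.symm
  simp [phi]

theorem tail_map_range (f : Nat → Int) (v : Nat) :
    ((List.range (v + 1)).map f).tail = (List.range v).map (fun t => f (t + 1)) := by
  rw [List.range_succ_eq_map]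
  simp [List.map_map]

theorem map_enumerate_map {α β γ : Type} (h : α → β) (F : Int × β → γ) :
    ∀ (l : List α) (s : Int),
      (PySem.List.enumerate (l.map h) s).map F
        = (PySem.List.enumerate l s).map (fun p => F (p.1, h p.2)) := by
  intro l
  induction l with
  | nil => intro s; simp [PySem.List.enumerate_nil]
  | cons x xs ih =>
    intro s
    rw [List.map_cons, PySem.List.enumerate_cons, PySem.List.enumerate_cons]
    simp only [List.map_cons]
    rw [ih (s + 1)]

theorem map_enumerate_range (F : Int × Nat → Int) (v : Nat) :
    (PySem.List.enumerate (List.range v) 0).map F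
      = (List.range v).map (fun (t : Nat) => F ((t : Int), t)) := by
  apply List.ext_getElem
  · simp [PySem.List.length_enumerate]
  · intro k h1 h2
    rw [List.getElem_map, List.getElem_map, PySem.List.getElem_enumerate, List.getElem_range]
    simp

theorem stepRowB_eq (total mx : Int) (f : Nat → Int) (v : Nat) :
    stepRowB total mx ((List.range (v + 1)).map f)
      = (List.range v).map
          (fun (t : Nat) => PySem.Int.mod
            (total - f 0 + (if mx - 1 - (t : Int) ≠ 0 then f (t + 1) else 0)) pvMOD) := by
  unfold stepRowB
  rw [PySem.List.slice_from_one, tail_map_range, headD_map_range (by omega)]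
  rw [map_enumerate_map (fun t => f (t + 1))
    (fun tv => PySem.Int.mod (total - f 0 + (if mx - 1 - tv.1 ≠ 0 then tv.2 else 0)) pvMOD)
    (List.range v) 0]
  rw [map_enumerate_range
    (fun p => PySem.Int.mod (total - f 0 + (if mx - 1 - p.1 ≠ 0 then f (p.2 + 1) else 0)) pvMOD) v]

theorem fold_inv (n : Int) (rollMax : List Int) (hn : 1 ≤ n) :
    ∀ k, k ≤ n.toNat - 1 →
      (PySem.List.pyRange 1 (1 + (k : Int)) 1).foldl (stepFoldB rollMax)
          (rollMax.map fun _ => List.replicate n.toNat 1)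
        = TB rollMax n.toNat k := by
  intro k
  induction k with
  | zero =>
    intro _
    rw [PySem.List.pyRange_one_eq_nil (by omega)]
    simpa using init_eq_TB n rollMax
  | succ k ih =>
    intro hk
    have hN : (1 : Nat) ≤ n.toNat := by omega
    have h1 : (1 : Int) + ((k + 1 : Nat) : Int) = (1 + (k : Int)) + 1 := by push_cast; ring
    rw [h1, PySem.List.pyRange_one_succ_right (by omega), List.foldl_append,
        ih (by omega), List.foldl_cons, List.foldl_nil]
    show stepFoldB rollMax (TB rollMax n.toNat k) (1 + (k : Int)) = TB rollMax n.toNat (k + 1)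
    unfold stepFoldB
    rw [total_eq rollMax n.toNat k (by omega)]
    rw [show (TB rollMax n.toNat k) = rollMax.map (fun m => (List.range (n.toNat - k)).map (fun (t : Nat) => phi rollMax k m (m - 1 - (t : Int)))) from rfl]
    rw [zip_self_map]
    rw [List.map_map]
    unfold TB
    apply List.map_congr_left
    intro m _
    simp only [Function.comp_apply]
    have hv : n.toNat - k = (n.toNat - (k + 1)) + 1 := by omega
    rw [hv, stepRowB_eq]
    apply List.map_congr_left
    intro t ht
    rw [List.mem_range] at ht
    show _ = phi rollMax (k + 1) m (m - 1 - (t : Int))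
    rw [phi]
    congr 1
    congr 1
    · congr 1
      norm_num
    · by_cases hc : m - 1 - (t : Int) ≠ 0
      · rw [if_pos hc, if_pos hc]
        congr 1
        push_cast
        ring
      · rw [if_neg hc, if_neg hc]

theorem map_snd_f (xs : List Int) (f : Int → Int) :
    (PySem.List.enumerate xs).map (fun jm => f jm.2) = xs.map f := by
  calc (PySem.List.enumerate xs).map (fun jm => f jm.2)
      = ((PySem.List.enumerate xs).map (fun x => x.2)).map f := by rw [List.map_map]; rfl
    _ = xs.map f := by rw [PySem.List.map_snd_enumerate]

theorem foldl_body_nil (l : List Int) (g : List (List Int) → Int → List (List Int))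
    (hg : ∀ c i, g c i = []) : l.foldl g [] = [] := by
  induction l with
  | nil => rfl
  | cons x xs ih => rw [List.foldl_cons, hg]; exact ih

-- ===== VERDICT (by name: the statement is the Claim_ definition above) =====
theorem dieSimulator2_spec : Claim_equal_dieSimulator2 := by
  intro n rollMax _ hpre
  unfold Spec_dieSimulator2
  by_cases hn : 1 ≤ n
  · -- main case
    have hN : 1 ≤ n.toNat := by omega
    -- A side: the memoized fold computes the pure dfs values …
    rw [show dieSimulator2 n rollMax
        = PySem.Int.mod
            (((PySem.List.enumerate rollMax).foldl
              (fun acc jm =>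
                let v := dfsAM rollMax (n - 1).toNat jm.1 (jm.2 - 1) acc.2
                (acc.1 + v.1, v.2))
              ((0 : Int), (∅ : MemoA))).1) pvMOD from rfl]
    rw [foldl_top rollMax (n - 1).toNat (PySem.List.enumerate rollMax) 0 ∅ (memoOK_empty rollMax)]
    -- … which are phi at each index
    rw [PySem.List.foldl_add, zero_add]
    rw [List.map_congr_left (l := PySem.List.enumerate rollMax)
      (f := fun jm => dfsAref rollMax (n - 1).toNat jm.1 (jm.2 - 1))
      (g := fun jm => phi rollMax (n.toNat - 1) jm.2 (jm.2 - 1))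
      (by
        intro jm hmem
        obtain ⟨kk, hkk, rfl⟩ := (PySem.List.mem_enumerate_iff rollMax 0 jm).1 hmem
        dsimp only
        have h0 : ((0 : Int) + (kk : Nat)) = ((kk : Nat) : Int) := by omega
        have h1 : (n - 1).toNat = n.toNat - 1 := by omega
        rw [h0, h1, dfsA_eq_phi rollMax (n.toNat - 1) kk hkk]
        rw [List.getD_eq_getElem rollMax 0 hkk])]
    rw [map_snd_f rollMax (fun m => phi rollMax (n.toNat - 1) m (m - 1))]
    -- B side
    rw [alt_eq_fold]
    have hrange : PySem.List.pyRange 1 n 1 = PySem.List.pyRange 1 (1 + ((n.toNat - 1 : Nat) : Int)) 1 := by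
      congr 1
      omega
    rw [hrange, fold_inv n rollMax hn (n.toNat - 1) (by omega),
        total_eq rollMax n.toNat (n.toNat - 1) (by omega)]
  · -- rollMax = [] (and n ≤ 0)
    have hnil : rollMax = [] := by
      rcases hpre with h | h
      · omega
      · exact h
    subst hnil
    rw [show dieSimulator2 n []
        = PySem.Int.mod
            (((PySem.List.enumerate ([] : List Int)).foldl
              (fun acc jm =>
                let v := dfsAM [] (n - 1).toNat jm.1 (jm.2 - 1) acc.2
                (acc.1 + v.1, v.2))
              ((0 : Int), (∅ : MemoA))).1) pvMOD from rfl]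
    rw [alt_eq_fold]
    rw [PySem.List.enumerate_nil, List.foldl_nil]
    simp only [List.map_nil]
    rw [foldl_body_nil (PySem.List.pyRange 1 n 1) (stepFoldB []) (by intro c i; rfl), List.foldl_nil]
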